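-- pv_equiv track=rewrite | github.com/StonyBrookNLP/ICTC | scripts/preprocess.py | contains_both_tags
-- ===== SOURCE A (Python) =====
-- def contains_both_tags(tweet, tag_set1, tag_set2):
--
--     tweet_words = tweet.split()
--
--     tag1_present = False
--
--     for tag in tag_set1:
--         if tag in tweet_words:
--             tag1_present = True
--             break
--
--     for tag in tag_set2:
--         if tag in tweet_words:
--             if tag1_present:
--                 return True
--
--     return False
-- ===== SOURCE B (Python) =====
-- def contains_both_tags(tweet, tag_set1, tag_set2):
--     s1, s2 = set(tag_set1), set(tag_set2)
--     found1 = found2 = False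
--     for word in tweet.split():
--         if word in s1:
--             found1 = True
--         if word in s2:
--             found2 = True
--         if found1 and found2:
--             return True
--     return False
-- ===== Notes on version B (the rewrite author's own statement) =====
-- stated objective: alternative
-- what changed: Replaces A's two passes over the tag lists (each scanning the word list) with a single pass over the tweet's words maintaining two found-flags against hash sets of the tags, returning as soon as both flags are set.
import Mathlib
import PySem

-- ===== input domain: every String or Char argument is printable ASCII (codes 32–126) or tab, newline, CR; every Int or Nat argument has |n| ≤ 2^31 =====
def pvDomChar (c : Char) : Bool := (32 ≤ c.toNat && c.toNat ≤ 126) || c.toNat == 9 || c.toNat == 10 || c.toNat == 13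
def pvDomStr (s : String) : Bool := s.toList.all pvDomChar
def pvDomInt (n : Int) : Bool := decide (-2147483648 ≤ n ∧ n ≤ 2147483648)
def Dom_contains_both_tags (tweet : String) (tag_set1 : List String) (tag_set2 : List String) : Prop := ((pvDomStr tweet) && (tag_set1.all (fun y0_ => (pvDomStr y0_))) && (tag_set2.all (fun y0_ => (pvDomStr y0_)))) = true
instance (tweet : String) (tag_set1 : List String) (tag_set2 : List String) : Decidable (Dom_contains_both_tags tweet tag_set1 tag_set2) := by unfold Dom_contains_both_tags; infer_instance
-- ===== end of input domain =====

-- B replaces A's two passes over the tag lists by a single pass over the tweet's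
-- words with two membership flags against sets of the tags (objective: alternative).


-- ===== PORT A =====
-- first loop of A: scan tag_set1, break (return true) at the first tag among the words
def cbtLoop1 (words : List String) : List String → Bool
  | [] => false
  | t :: ts => if words.contains t then true else cbtLoop1 words ts

-- second loop of A: scan tag_set2; on a hit, return True only if tag1_present
def cbtLoop2 (words : List String) (p : Bool) : List String → Bool
  | [] => false
  | t :: ts => if words.contains t then (if p then true else cbtLoop2 words p ts) else cbtLoop2 words p ts

def contains_both_tags (tweet : String) (tag_set1 : List String) (tag_set2 : List String) : Bool :=
  let tweet_words := PySem.Str.split₀ tweet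
  let tag1_present := cbtLoop1 tweet_words tag_set1
  cbtLoop2 tweet_words tag1_present tag_set2

-- ===== PORT B =====
-- B's single pass over the words, two flags, early exit when both are set
def cbtLoopB (s1 s2 : PySem.Set String) : List String → Bool → Bool → Bool
  | [], _, _ => false
  | w :: ws, f1, f2 =>
    let f1 := f1 || PySem.Set.contains s1 w
    let f2 := f2 || PySem.Set.contains s2 w
    if f1 && f2 then true else cbtLoopB s1 s2 ws f1 f2

def contains_both_tags_alt (tweet : String) (tag_set1 : List String) (tag_set2 : List String) : Bool :=
  cbtLoopB (PySem.Set.ofList tag_set1) (PySem.Set.ofList tag_set2) (PySem.Str.split₀ tweet) false false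

-- ===== PRECONDITION & SPEC =====
def Spec_contains_both_tags (tweet : String) (tag_set1 : List String) (tag_set2 : List String) (out : Bool) : Prop := out = contains_both_tags_alt tweet tag_set1 tag_set2
instance (tweet : String) (tag_set1 : List String) (tag_set2 : List String) (out : Bool) : Decidable (Spec_contains_both_tags tweet tag_set1 tag_set2 out) := by unfold Spec_contains_both_tags; infer_instance

-- ===== CLAIM (what is proved, stated in full; the proofs are below) =====
def Claim_equal_contains_both_tags : Prop := ∀ (tweet : String) (tag_set1 : List String) (tag_set2 : List String), Dom_contains_both_tags tweet tag_set1 tag_set2 → Spec_contains_both_tags tweet tag_set1 tag_set2 (contains_both_tags tweet tag_set1 tag_set2)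

-- ===== LEMMAS AND PROOFS =====
theorem cbtLoop1_eq (words : List String) (ts : List String) :
    cbtLoop1 words ts = ts.any words.contains := by
  induction ts with
  | nil => rfl
  | cons t ts ih => by_cases h : words.contains t <;> simp [cbtLoop1, h, ih]

theorem cbtLoop2_eq (words : List String) (p : Bool) (ts : List String) :
    cbtLoop2 words p ts = (p && ts.any words.contains) := by
  induction ts with
  | nil => simp [cbtLoop2]
  | cons t ts ih =>
    by_cases h : words.contains t <;> cases p <;> simp [cbtLoop2, h, ih]

theorem cbtLoopB_eq (s1 s2 : PySem.Set String) (ws : List String) :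
    ∀ (f1 f2 : Bool), (f1 && f2) = false →
      cbtLoopB s1 s2 ws f1 f2 =
        ((f1 || ws.any (PySem.Set.contains s1)) && (f2 || ws.any (PySem.Set.contains s2))) := by
  induction ws with
  | nil => intro f1 f2 h; simp [cbtLoopB, h]
  | cons w ws ih =>
    intro f1 f2 h
    by_cases h1 : ((f1 || PySem.Set.contains s1 w) && (f2 || PySem.Set.contains s2 w)) = true
    · rcases Bool.and_eq_true .. |>.mp h1 with ⟨a, b⟩
      rw [cbtLoopB]
      simp only [h1, if_pos]
      rcases Bool.or_eq_true .. |>.mp a with a | a <;>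
        rcases Bool.or_eq_true .. |>.mp b with b | b <;>
        (try simp only [PySem.Set.contains, List.contains_iff_mem] at a b) <;>
        simp [List.any_cons, PySem.Set.contains, List.contains_iff_mem, a, b]
    · have h1' : ((f1 || PySem.Set.contains s1 w) && (f2 || PySem.Set.contains s2 w)) = false :=
        Bool.eq_false_iff.mpr h1
      rw [cbtLoopB]
      simp only [h1', Bool.false_eq_true, if_false]
      rw [ih _ _ h1']
      cases f1 <;> cases f2 <;> cases hc1 : PySem.Set.contains s1 w <;> cases hc2 : PySem.Set.contains s2 w <;>
        simp_all [List.any_cons]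

-- membership scanned from either side is the same condition
theorem any_contains_ofList (ws ts : List String) :
    ws.any (PySem.Set.contains (PySem.Set.ofList ts)) = ts.any ws.contains := by
  apply Bool.eq_iff_iff.mpr
  simp only [List.any_eq_true, PySem.Set.contains, List.contains_iff_mem, PySem.Set.mem_ofList]
  tauto

-- ===== VERDICT (by name: the statement is the Claim_ definition above) =====
theorem contains_both_tags_spec : Claim_equal_contains_both_tags := by
  intro tweet s1 s2 _
  unfold Spec_contains_both_tags contains_both_tags contains_both_tags_alt
  show cbtLoop2 (PySem.Str.split₀ tweet) (cbtLoop1 (PySem.Str.split₀ tweet) s1) s2 =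
      cbtLoopB (PySem.Set.ofList s1) (PySem.Set.ofList s2) (PySem.Str.split₀ tweet) false false
  rw [cbtLoop1_eq, cbtLoop2_eq, cbtLoopB_eq _ _ _ false false rfl]
  simp only [Bool.false_or]
  rw [any_contains_ofList, any_contains_ofList, Bool.and_comm]
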